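-- pv_equiv track=rewrite | github.com/changediyasunny/Projects | Beer_sentiment_NLP/classify.py | pos_tagger_features
-- ===== SOURCE A (Python) =====
-- from collections import Counter, defaultdict
--
-- def window_iterator(tokens, k=3):
--     """ get window iterator """
--     windows = []
--     counter = True
--     while counter:
--         result = tuple(tokens[:k])
--         if not result:
--             counter = False
--             continue
--         windows.append(result)
--         tokens = tokens[1:]
--     windows = [w for w in windows if not (len(w) < k)]
--     return windows
--
-- def pos_tagger_features(tokens_list, feats, pos_freq):
--     """
--         args:
--             pos_freq: actual postag list for doc
--         Tagger rulesused are as follows: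
--             JJ-->NN
--             RB-->NN
--             NN-->VBZ-->JJ
--             NN-->IN-->JJ
--     """
--     temp_features = defaultdict(lambda:0)
--     tags = pos_freq
--     tuple_window = window_iterator(tags, k=3)
--     feature = ''
--
--     for each_tuple in tuple_window:
--         raw_feature = '_'.join(tup[0] for tup in each_tuple)
--         if 'JJ' in each_tuple[0]:
--             noun_terms = ['NN', 'NNS', 'NNP', 'NNPS']
--             if each_tuple[1][1] in noun_terms or \
--                     each_tuple[2][1] in noun_terms:
--                 feature = 'pos_' + raw_feature
--         elif 'NN' in each_tuple[0]:
--             if each_tuple[2][1] == 'JJ':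
--                 feature = 'pos_' + raw_feature
--         elif 'RB' in each_tuple[0]:
--             feature = 'pos_' + raw_feature
--
--         if feature:
--             temp_features[feature] += 1
--
--     for k, v in temp_features.items():
--         feats[k] = v
--     return feats
-- ===== SOURCE B (Python) =====
-- from collections import Counter
--
-- def pos_tagger_features(tokens_list, feats, pos_freq):
--     """Same features: one zip-based pass over tag triples (no window helper),
--     counting via Counter, then merged into feats with dict.update."""
--     noun_terms = ['NN', 'NNS', 'NNP', 'NNPS']
--     seq = []
--     feature = ''
--     for a, bc in zip(pos_freq, zip(pos_freq[1:], pos_freq[2:])):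
--         b, c = bc
--         if 'JJ' in a:
--             if b[1] in noun_terms or c[1] in noun_terms:
--                 feature = 'pos_' + '_'.join([a[0], b[0], c[0]])
--         elif 'NN' in a:
--             if c[1] == 'JJ':
--                 feature = 'pos_' + '_'.join([a[0], b[0], c[0]])
--         elif 'RB' in a:
--             feature = 'pos_' + '_'.join([a[0], b[0], c[0]])
--         if feature:
--             seq.append(feature)
--     feats.update(Counter(seq))
--     return feats
-- ===== Notes on version B (the rewrite author's own statement) =====
-- stated objective: simpler
-- what changed: Replaces the while-loop window_iterator helper (repeated slicing, then a length filter) and the in-loop defaultdict increments by a single zip-based pass over tag triples that collects the sticky feature sequence, counts it once with Counter, and merges into feats via dict.update.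
import Mathlib
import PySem

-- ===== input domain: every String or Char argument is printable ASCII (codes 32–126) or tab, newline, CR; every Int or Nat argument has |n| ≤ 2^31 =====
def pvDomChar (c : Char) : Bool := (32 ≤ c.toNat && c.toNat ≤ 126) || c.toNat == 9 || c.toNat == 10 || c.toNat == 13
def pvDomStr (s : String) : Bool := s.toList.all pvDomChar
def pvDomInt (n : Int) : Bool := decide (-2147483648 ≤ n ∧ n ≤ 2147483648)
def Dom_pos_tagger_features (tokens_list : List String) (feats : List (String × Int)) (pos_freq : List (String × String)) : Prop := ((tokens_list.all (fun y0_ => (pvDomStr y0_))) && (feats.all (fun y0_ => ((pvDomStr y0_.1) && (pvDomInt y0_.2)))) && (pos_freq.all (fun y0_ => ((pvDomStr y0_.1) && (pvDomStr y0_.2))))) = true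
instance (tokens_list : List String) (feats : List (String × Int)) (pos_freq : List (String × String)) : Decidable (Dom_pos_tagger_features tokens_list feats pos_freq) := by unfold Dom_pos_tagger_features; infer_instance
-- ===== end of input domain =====

-- B replaces the while-slicing window helper + in-loop defaultdict counting by one zip pass
-- collecting the (sticky) feature sequence, Counter once, then dict.update; return value only:
-- the Python A mutates `feats` in place (B performs the same mutation via dict.update).

-- ===== PORT A =====

-- window_iterator's while loop: take tokens[:3], stop when empty, advance tokens = tokens[1:]
def pvWindRec (tokens : List (String × String)) : List (List (String × String)) :=
  match tokens with
  | [] => []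
  | t :: rest => ((t :: rest).take 3) :: pvWindRec rest

def window_iterator (tokens : List (String × String)) : List (List (String × String)) :=
  (pvWindRec tokens).filter (fun w => !(w.length < 3))

-- one iteration of A's for-loop: state (feature, temp_features)
def pvStepA (st : String × PySem.Dict String Int) (each_tuple : List (String × String)) :
    String × PySem.Dict String Int :=
  match each_tuple with
  | [a, b, c] =>
    let raw_feature := PySem.Str.join "_" (([a, b, c]).map (·.1))
    let feature :=
      if a.1 = "JJ" ∨ a.2 = "JJ" then
        if b.2 ∈ ["NN", "NNS", "NNP", "NNPS"] ∨ c.2 ∈ ["NN", "NNS", "NNP", "NNPS"] then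
          "pos_" ++ raw_feature
        else st.1
      else if a.1 = "NN" ∨ a.2 = "NN" then
        if c.2 = "JJ" then "pos_" ++ raw_feature else st.1
      else if a.1 = "RB" ∨ a.2 = "RB" then "pos_" ++ raw_feature
      else st.1
    (feature, if feature ≠ "" then st.2.modify feature 0 (· + 1) else st.2)
  | _ => st  -- unreachable: the filter keeps only length-3 windows (totality guard)

def pos_tagger_features (tokens_list : List String) (feats : List (String × Int)) (pos_freq : List (String × String)) : List (String × Int) :=
  let tags := pos_freq
  let tuple_window := window_iterator tags
  let st := tuple_window.foldl pvStepA ("", PySem.Dict.empty)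
  ((st.2.items).foldl (fun d kv => d.insert kv.1 kv.2) (PySem.Dict.mk feats)).items

-- ===== PORT B =====

-- one iteration of B's zip loop: state (feature, seq)
def pvStepB (st : String × List String)
    (t : (String × String) × ((String × String) × (String × String))) : String × List String :=
  let a := t.1
  let b := t.2.1
  let c := t.2.2
  let feature :=
    if a.1 = "JJ" ∨ a.2 = "JJ" then
      if b.2 ∈ ["NN", "NNS", "NNP", "NNPS"] ∨ c.2 ∈ ["NN", "NNS", "NNP", "NNPS"] then
        "pos_" ++ PySem.Str.join "_" [a.1, b.1, c.1]
      else st.1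
    else if a.1 = "NN" ∨ a.2 = "NN" then
      if c.2 = "JJ" then "pos_" ++ PySem.Str.join "_" [a.1, b.1, c.1] else st.1
    else if a.1 = "RB" ∨ a.2 = "RB" then "pos_" ++ PySem.Str.join "_" [a.1, b.1, c.1]
    else st.1
  (feature, if feature ≠ "" then st.2 ++ [feature] else st.2)

def pos_tagger_features_alt (tokens_list : List String) (feats : List (String × Int)) (pos_freq : List (String × String)) : List (String × Int) :=
  let z := pos_freq.zip ((PySem.List.slice pos_freq (some 1) none).zip
    (PySem.List.slice pos_freq (some 2) none))
  let seq := (z.foldl pvStepB ("", [])).2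
  let cnt := PySem.Dict.counter seq
  ((PySem.Dict.mk feats).update cnt.items).items

-- ===== PRECONDITION & SPEC =====
def Spec_pos_tagger_features (tokens_list : List String) (feats : List (String × Int)) (pos_freq : List (String × String)) (out : List (String × Int)) : Prop := out = pos_tagger_features_alt tokens_list feats pos_freq
instance (tokens_list : List String) (feats : List (String × Int)) (pos_freq : List (String × String)) (out : List (String × Int)) : Decidable (Spec_pos_tagger_features tokens_list feats pos_freq out) := by unfold Spec_pos_tagger_features; infer_instance

-- ===== CLAIM (what is proved, stated in full; the proofs are below) =====
def Claim_equal_pos_tagger_features : Prop := ∀ (tokens_list : List String) (feats : List (String × Int)) (pos_freq : List (String × String)), Dom_pos_tagger_features tokens_list feats pos_freq → Spec_pos_tagger_features tokens_list feats pos_freq (pos_tagger_features tokens_list feats pos_freq)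

-- ===== LEMMAS AND PROOFS =====

-- A's filtered window list is the zip-triple list, with each triple written as a 3-element list
theorem pv_win_eq (l : List (String × String)) :
    window_iterator l =
      (l.zip ((l.drop 1).zip (l.drop 2))).map (fun t => [t.1, t.2.1, t.2.2]) := by
  induction l with
  | nil => rfl
  | cons a t ih =>
    match t with
    | [] => rfl
    | [b] => rfl
    | b :: c :: r =>
      show window_iterator (a :: b :: c :: r) = _
      have h1 : window_iterator (a :: b :: c :: r) = [a, b, c] :: window_iterator (b :: c :: r) := by
        simp [window_iterator, pvWindRec, List.take]
      rw [h1, ih]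
      rfl

-- pvStepB's seq component only appends: running from (f, s) is running from (f, []) with s prepended
theorem pv_foldB_acc (z : List ((String × String) × ((String × String) × (String × String))))
    (f : String) (s : List String) :
    z.foldl pvStepB (f, s) = ((z.foldl pvStepB (f, [])).1, s ++ (z.foldl pvStepB (f, [])).2) := by
  induction z generalizing f s with
  | nil => simp
  | cons t z ih =>
    simp only [List.foldl_cons]
    rw [show pvStepB (f, s) t = ((pvStepB (f, []) t).1, s ++ (pvStepB (f, []) t).2) by
          simp [pvStepB]; split_ifs <;> simp]
    rw [ih, ih ((pvStepB (f, []) t).1) ((pvStepB (f, []) t).2)]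
    simp

-- A's loop over triples = B's loop, with the collected sequence folded into the dict
theorem pv_fold_eq (z : List ((String × String) × ((String × String) × (String × String))))
    (f : String) (d : PySem.Dict String Int) :
    z.foldl (fun s t => pvStepA s [t.1, t.2.1, t.2.2]) (f, d) =
      ((z.foldl pvStepB (f, [])).1,
        (z.foldl pvStepB (f, [])).2.foldl (fun d x => d.modify x 0 (· + 1)) d) := by
  induction z generalizing f d with
  | nil => simp
  | cons t z ih =>
    simp only [List.foldl_cons]
    have hstep : pvStepA (f, d) [t.1, t.2.1, t.2.2] =
        ((pvStepB (f, []) t).1,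
          (pvStepB (f, []) t).2.foldl (fun d x => d.modify x 0 (· + 1)) d) := by
      simp [pvStepA, pvStepB]; split_ifs <;> simp_all
    rw [hstep, ih]
    rw [pv_foldB_acc z (pvStepB (f, []) t).1 (pvStepB (f, []) t).2]
    simp [List.foldl_append]

-- ===== VERDICT (by name: the statement is the Claim_ definition above) =====
theorem pos_tagger_features_spec : Claim_equal_pos_tagger_features := by
  intro tokens_list feats pos_freq _
  show _ = _
  have h1 : PySem.List.slice pos_freq (some 1) none = pos_freq.drop 1 := by simp [pysem]
  have h2 : PySem.List.slice pos_freq (some 2) none = pos_freq.drop 2 := by simp [pysem]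
  simp only [pos_tagger_features, pos_tagger_features_alt, h1, h2, pv_win_eq, List.foldl_map,
    pv_fold_eq]
  rfl
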